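-- pv_equiv track=rewrite | github.com/alexandraback/datacollection | solutions_2751486_0/Python/ccapell/v1.py | tieneCons
-- ===== SOURCE A (Python) =====
-- def tieneCons (nom, num):
--
--     vocales = ('a','e','i','o','u')
--     voca = 0
--     cons = False
--     contCons = 0
--     max = 0
--
--     #print nom
--     for i in range(len(nom)):
--         #print nom[i]
--         if nom[i] in vocales:
--             cons = False
--             if max < contCons:
--                 max = contCons
--             contCons = 0
--         else:
--             cons = True
--             contCons +=1
--
--     if max < contCons:
--         max = contCons
--
--     #print "contador:" + str(max)
--     if max >= num:
--         #print "Si"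
--         return True
--     else:
--         #print "NO"
--         return False
-- ===== SOURCE B (Python) =====
-- def tieneCons(nom, num):
--     # Prefix counts of consonants; a run of num consonants exists iff some
--     # window of length num contains num consonants (tested by subtraction).
--     vowels = 'aeiou'
--     if num <= 0:
--         return True
--     pref = [0]
--     total = 0
--     for c in nom:
--         total += c not in vowels
--         pref.append(total)
--     return any(pref[i + num] - pref[i] == num for i in range(len(nom) - num + 1))
-- ===== Notes on version B (the rewrite author's own statement) =====
-- stated objective: alternative
-- what changed: Replaces A's single pass maintaining a running consonant counter and a maximum with a prefix-count array plus a window-existence test: B precomputes consonant counts of every prefix and checks whether some window of num consecutive characters contains num consonants, plus the trivial num <= 0 case.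
import Mathlib
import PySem

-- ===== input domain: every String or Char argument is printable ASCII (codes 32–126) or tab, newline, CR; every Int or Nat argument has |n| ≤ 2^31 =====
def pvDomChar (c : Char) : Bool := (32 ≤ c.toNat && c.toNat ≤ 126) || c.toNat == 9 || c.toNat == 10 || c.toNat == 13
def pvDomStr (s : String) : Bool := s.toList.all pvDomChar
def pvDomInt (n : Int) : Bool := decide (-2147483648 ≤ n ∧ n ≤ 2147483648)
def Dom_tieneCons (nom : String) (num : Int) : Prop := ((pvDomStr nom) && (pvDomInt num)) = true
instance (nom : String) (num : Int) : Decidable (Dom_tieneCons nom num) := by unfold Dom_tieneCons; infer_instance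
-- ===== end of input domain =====

-- B replaces A's running-counter pass with a direct window-existence test (alternative algorithm, no speed claim).

-- ===== PORT A =====
-- literal port of A's loop; `voca` is dead in A (never read or written after init) and omitted,
-- the state carries (cons, contCons, max) exactly as A updates them; nom[i] is in range for every
-- i produced by range(len(nom)), so pyGetD's default is never used.
def tieneCons (nom : String) (num : Int) : Bool :=
  let vocales : List Char := ['a', 'e', 'i', 'o', 'u']
  let st :=
    (PySem.List.pyRange 0 (PySem.Str.len nom) 1).foldl
      (fun (st : Bool × Int × Int) i =>
        let cons := st.1; let contCons := st.2.1; let mx := st.2.2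
        if PySem.List.pyGetD nom.toList i ' ' ∈ vocales then
          (false, 0, if mx < contCons then contCons else mx)
        else
          (true, contCons + 1, mx))
      (false, 0, 0)
  let mx := if st.2.2 < st.2.1 then st.2.1 else st.2.2
  if mx ≥ num then true else false

-- ===== PORT B =====
-- literal port of Source B; `c not in 'aeiou'` for the single character c is membership in the vowel
-- characters, and `total += (c not in vowels)` adds the bool as 0/1.
def tieneCons_alt (nom : String) (num : Int) : Bool :=
  let vowels : List Char := ['a', 'e', 'i', 'o', 'u']
  if num ≤ 0 then true
  else
    let st :=
      nom.toList.foldl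
        (fun (st : Int × List Int) c =>
          let total := st.1 + (if vowels.contains c then 0 else 1)
          (total, st.2 ++ [total]))
        (0, [0])
    let pref := st.2
    (PySem.List.pyRange 0 (PySem.Str.len nom - num + 1) 1).any
      (fun i => decide (PySem.List.pyGetD pref (i + num) 0 - PySem.List.pyGetD pref i 0 = num))

-- ===== PRECONDITION & SPEC =====
def Spec_tieneCons (nom : String) (num : Int) (out : Bool) : Prop := out = tieneCons_alt nom num
instance (nom : String) (num : Int) (out : Bool) : Decidable (Spec_tieneCons nom num out) := by unfold Spec_tieneCons; infer_instance

-- ===== CLAIM (what is proved, stated in full; the proofs are below) =====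
def Claim_equal_tieneCons : Prop := ∀ (nom : String) (num : Int), Dom_tieneCons nom num → Spec_tieneCons nom num (tieneCons nom num)

-- ===== LEMMAS AND PROOFS =====

def pvVow (c : Char) : Bool := c ∈ (['a', 'e', 'i', 'o', 'u'] : List Char)

-- A's "longest consonant run" value, with the current run already cont long
def pvR (cont : Int) : List Char → Int
  | [] => cont
  | c :: cs => if pvVow c then max cont (pvR 0 cs) else pvR (cont + 1) cs

-- length of the leading consonant run
def pvL (cs : List Char) : Int := ((cs.takeWhile (fun c => !pvVow c)).length : Int)

-- max over all suffixes of the leading-run length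
def pvM : List Char → Int
  | [] => 0
  | c :: cs => max (pvL (c :: cs)) (pvM cs)

theorem pvL_nonneg (cs : List Char) : 0 ≤ pvL cs := by
  simp [pvL]

theorem pvL_le_pvM (cs : List Char) : pvL cs ≤ pvM cs := by
  cases cs with
  | nil => simp [pvL, pvM]
  | cons c cs => simp [pvM]

theorem pvR_eq (cs : List Char) : ∀ cont : Int, 0 ≤ cont →
    pvR cont cs = max (cont + pvL cs) (pvM cs) := by
  induction cs with
  | nil => intro cont h; simp [pvR, pvL, pvM]; omega
  | cons c cs ih =>
    intro cont h
    by_cases hv : pvVow c = true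
    · have h0 := ih 0 le_rfl
      have hLM := pvL_le_pvM cs
      simp [pvR, hv, pvL, pvM, List.takeWhile] at *
      omega
    · have h1 := ih (cont + 1) (by omega)
      have hL := pvL_nonneg cs
      have h0 := ih 0 le_rfl
      simp [pvR, hv, pvL, pvM, List.takeWhile] at *
      omega

theorem pvR_nonneg (cs : List Char) : 0 ≤ pvR 0 cs := by
  have h := pvR_eq cs 0 le_rfl
  have h1 := pvL_nonneg cs
  omega

def pvStep (st : Bool × Int × Int) (c : Char) : Bool × Int × Int :=
  if pvVow c then (false, 0, if st.2.2 < st.2.1 then st.2.1 else st.2.2)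
  else (true, st.2.1 + 1, st.2.2)

theorem pvA_fold (cs : List Char) : ∀ (b : Bool) (cont mx : Int),
    (if (cs.foldl pvStep (b, cont, mx)).2.2 < (cs.foldl pvStep (b, cont, mx)).2.1
     then (cs.foldl pvStep (b, cont, mx)).2.1 else (cs.foldl pvStep (b, cont, mx)).2.2)
    = max mx (pvR cont cs) := by
  induction cs with
  | nil => intro b cont mx; simp [pvR]; split_ifs <;> omega
  | cons c cs ih =>
    intro b cont mx
    by_cases hv : pvVow c = true
    · simp only [List.foldl_cons, pvStep, hv, if_true, pvR]
      rw [ih]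
      split_ifs <;> omega
    · simp only [List.foldl_cons, pvStep, hv, if_false, Bool.false_eq_true, pvR]
      rw [ih]

theorem pvA_eq (nom : String) (num : Int) :
    tieneCons nom num = decide (num ≤ pvR 0 nom.toList) := by
  have hlam : (fun (st : Bool × Int × Int) (i : Int) =>
      let cons := st.1; let contCons := st.2.1; let mx := st.2.2
      if PySem.List.pyGetD nom.toList i ' ' ∈ (['a', 'e', 'i', 'o', 'u'] : List Char) then
        (false, 0, if mx < contCons then contCons else mx)
      else (true, contCons + 1, mx))
      = fun (st : Bool × Int × Int) (i : Int) => pvStep st (PySem.List.pyGetD nom.toList i ' ') := by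
    funext st i
    simp [pvStep, pvVow]
  have hfold := PySem.List.foldl_pyRange_zero_pyGetD' nom.toList ' ' pvStep
      ((false : Bool), (0 : Int), (0 : Int))
  simp only [tieneCons, PySem.Str.len_eq, hlam, hfold]
  rw [pvA_fold nom.toList false 0 0]
  have h0 := pvR_nonneg nom.toList
  by_cases hle : num ≤ pvR 0 nom.toList
  · rw [decide_eq_true hle, if_pos (by omega)]
  · rw [decide_eq_false hle, if_neg (by omega)]

-- take n is all-consonant iff the leading consonant run has length ≥ n (for n within the list)
theorem pvTake_takeWhile (l : List Char) : ∀ n : Nat, n ≤ l.length →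
    (((l.take n).all (fun c => !pvVow c)) = true ↔ n ≤ (l.takeWhile (fun c => !pvVow c)).length) := by
  induction l with
  | nil => intro n h; simp at h; subst h; simp
  | cons c cs ih =>
    intro n h
    cases n with
    | zero => simp
    | succ n =>
      by_cases hv : pvVow c = true
      · simp [hv]
      · have hn : n ≤ cs.length := by simpa using h
        simp [hv, ih n hn]

theorem pvL_drop_le_pvM (cs : List Char) : ∀ i : Nat, pvL (cs.drop i) ≤ pvM cs := by
  induction cs with
  | nil => intro i; simp [pvL, pvM]
  | cons c cs ih =>
    intro i
    cases i with
    | zero => simpa using pvL_le_pvM (c :: cs)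
    | succ i =>
      have h := ih i
      have h2 : pvM cs ≤ pvM (c :: cs) := by simp [pvM]
      simpa using le_trans h h2

theorem pvM_sup (cs : List Char) (num : Int) (h1 : 1 ≤ num) :
    num ≤ pvM cs ↔ ∃ i : Nat, num ≤ pvL (cs.drop i) := by
  constructor
  · intro h
    induction cs with
    | nil => exfalso; simp [pvM] at h; omega
    | cons c cs ih =>
      simp only [pvM] at h
      by_cases hc : num ≤ pvL (c :: cs)
      · exact ⟨0, by simpa using hc⟩
      · have : num ≤ pvM cs := by omega
        obtain ⟨i, hi⟩ := ih this
        exact ⟨i + 1, by simpa using hi⟩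
  · rintro ⟨i, hi⟩
    exact le_trans hi (pvL_drop_le_pvM cs i)

theorem pvM_window (cs : List Char) (num : Int) (h1 : 1 ≤ num) :
    num ≤ pvM cs ↔ ∃ i : Nat, i + num.toNat ≤ cs.length ∧
      (((cs.drop i).take num.toNat).all (fun c => !pvVow c)) = true := by
  rw [pvM_sup cs num h1]
  constructor
  · rintro ⟨i, hi⟩
    have hlen : num.toNat ≤ ((cs.drop i).takeWhile (fun c => !pvVow c)).length := by
      simp only [pvL] at hi; omega
    have hb : ((cs.drop i).takeWhile (fun c => !pvVow c)).length ≤ (cs.drop i).length :=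
      (List.takeWhile_sublist _).length_le
    have hdlen : (cs.drop i).length = cs.length - i := List.length_drop ..
    refine ⟨i, by omega, ?_⟩
    rw [pvTake_takeWhile (cs.drop i) num.toNat (by omega)]
    exact hlen
  · rintro ⟨i, hle, hall⟩
    have hdlen : (cs.drop i).length = cs.length - i := List.length_drop ..
    rw [pvTake_takeWhile (cs.drop i) num.toNat (by omega)] at hall
    refine ⟨i, ?_⟩
    simp only [pvL]
    omega

theorem pvContains_eq (c : Char) :
    (['a', 'e', 'i', 'o', 'u'] : List Char).contains c = pvVow c := by
  simp [pvVow]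

-- the prefix list built by B's loop: pref[j] = number of consonants among the first j chars
def pvPref (cs : List Char) : List Int :=
  (List.range (cs.length + 1)).map (fun j => ((cs.take j).countP (fun c => !pvVow c) : Int))

theorem pvFold_pref (cs : List Char) :
    cs.foldl
      (fun (st : Int × List Int) c =>
        let total := st.1 + (if (['a', 'e', 'i', 'o', 'u'] : List Char).contains c then 0 else 1)
        (total, st.2 ++ [total]))
      (0, [0])
    = ((cs.countP (fun c => !pvVow c) : Int), pvPref cs) := by
  induction cs using List.reverseRecOn with
  | nil => simp [pvPref]
  | append_singleton cs c ih =>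
    rw [List.foldl_append, ih]
    have hcnt : ((cs ++ [c]).countP (fun c => !pvVow c) : Int)
        = (cs.countP (fun c => !pvVow c) : Int)
          + (if (['a', 'e', 'i', 'o', 'u'] : List Char).contains c then 0 else 1) := by
      rw [pvContains_eq]
      rcases Bool.eq_false_or_eq_true (pvVow c) with hv | hv <;>
        simp [List.countP_append, hv]
    have hpref : pvPref (cs ++ [c])
        = pvPref cs ++ [((cs ++ [c]).countP (fun c => !pvVow c) : Int)] := by
      simp only [pvPref, List.length_append, List.length_cons, List.length_nil, Nat.zero_add]
      rw [List.range_succ, List.map_append]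
      congr 1
      · apply List.map_congr_left
        intro j hj
        rw [List.mem_range] at hj
        rw [List.take_append_of_le_length (by omega)]
      · rw [List.map_cons, List.map_nil, List.take_of_length_le (by simp)]
    simp only [List.foldl_cons, List.foldl_nil, hpref, hcnt]

theorem pvPref_get (cs : List Char) (k : Nat) (hk : k ≤ cs.length) :
    PySem.List.pyGetD (pvPref cs) (k : Int) 0 = ((cs.take k).countP (fun c => !pvVow c) : Int) := by
  rw [PySem.List.pyGetD_natCast]
  have hk' : k < cs.length + 1 := by omega
  simp [pvPref, List.getD_eq_getElem?_getD, hk']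

theorem pvWindow_count (cs : List Char) (i : Nat) (n : Nat)
    (h : i + n ≤ cs.length) :
    ((cs.take (i + n)).countP (fun c => !pvVow c) : Int)
        - ((cs.take i).countP (fun c => !pvVow c) : Int) = n
    ↔ (((cs.drop i).take n).all (fun c => !pvVow c)) = true := by
  have hsplit : cs.take (i + n) = cs.take i ++ (cs.drop i).take n := List.take_add ..
  have hcnt : (cs.take (i + n)).countP (fun c => !pvVow c)
      = (cs.take i).countP (fun c => !pvVow c) + ((cs.drop i).take n).countP (fun c => !pvVow c) := by
    rw [hsplit, List.countP_append]
  have hwlen : ((cs.drop i).take n).length = n := by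
    rw [List.length_take, List.length_drop]; omega
  have hle := List.countP_le_length (p := fun c => !pvVow c) (l := (cs.drop i).take n)
  rw [hwlen] at hle
  constructor
  · intro heq
    have : ((cs.drop i).take n).countP (fun c => !pvVow c) = n := by omega
    rw [List.all_eq_true]
    intro c hc
    exact (List.countP_eq_length.mp (by rw [hwlen]; exact this)) c hc
  · intro hall
    have hlenEq := List.countP_eq_length.mpr (fun c hc => List.all_eq_true.mp hall c hc)
    rw [hwlen] at hlenEq
    omega

theorem pvB_eq (nom : String) (num : Int) (h1 : 1 ≤ num) :
    (tieneCons_alt nom num = true) ↔ ∃ i : Nat, i + num.toNat ≤ nom.toList.length ∧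
      (((nom.toList.drop i).take num.toNat).all (fun c => !pvVow c)) = true := by
  unfold tieneCons_alt
  rw [if_neg (by omega)]
  simp only [pvFold_pref]
  rw [List.any_eq_true]
  constructor
  · rintro ⟨i, hmem, hcond⟩
    rw [PySem.List.mem_pyRange_one] at hmem
    obtain ⟨h0i, hib⟩ := hmem
    simp only [PySem.Str.len_eq] at hib
    have hib' : i.toNat + num.toNat ≤ nom.toList.length := by omega
    have hri : i = ((i.toNat : Nat) : Int) := by omega
    have hrin : i + num = ((i.toNat + num.toNat : Nat) : Int) := by omega
    rw [hrin, hri, pvPref_get _ _ (by omega), pvPref_get _ _ (by omega)] at hcond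
    refine ⟨i.toNat, hib', ?_⟩
    rw [← pvWindow_count nom.toList i.toNat num.toNat hib']
    have hnn : ((num.toNat : Nat) : Int) = num := by omega
    rw [hnn]
    exact of_decide_eq_true hcond
  · rintro ⟨j, hj, hall⟩
    refine ⟨(j : Int), ?_, ?_⟩
    · rw [PySem.List.mem_pyRange_one]
      refine ⟨by omega, ?_⟩
      simp only [PySem.Str.len_eq]
      omega
    · have hrin : ((j : Int)) + num = ((j + num.toNat : Nat) : Int) := by omega
      rw [hrin, pvPref_get _ _ (by omega), pvPref_get _ _ (by omega)]
      have hw := (pvWindow_count nom.toList j num.toNat hj).mpr hall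
      have hnn : ((num.toNat : Nat) : Int) = num := by omega
      rw [hnn] at hw
      exact decide_eq_true hw

-- ===== VERDICT (by name: the statement is the Claim_ definition above) =====
theorem tieneCons_spec : Claim_equal_tieneCons := by
  intro nom num _
  unfold Spec_tieneCons
  by_cases h0 : num ≤ 0
  · have hR := pvR_nonneg nom.toList
    rw [pvA_eq nom num, decide_eq_true (by omega)]
    unfold tieneCons_alt
    rw [if_pos h0]
  · have hReq := pvR_eq nom.toList 0 le_rfl
    have hLM := pvL_le_pvM nom.toList
    have hM := pvM_window nom.toList num (by omega)
    have hB := pvB_eq nom num (by omega)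
    rw [pvA_eq nom num]
    have hMR : pvM nom.toList ≤ pvR 0 nom.toList := hReq ▸ le_max_right _ _
    by_cases hle : num ≤ pvR 0 nom.toList
    · have hm : num ≤ pvM nom.toList := by
        rcases le_max_iff.mp (hReq ▸ hle) with h | h
        · omega
        · exact h
      rw [decide_eq_true hle, Eq.comm, hB, ← hM]
      exact hm
    · rcases Bool.eq_false_or_eq_true (tieneCons_alt nom num) with hBt | hBf
      · exfalso
        have hm := hM.mpr (hB.mp hBt)
        omega
      · rw [decide_eq_false hle, hBf]
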